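-- pv_equiv track=rewrite | github.com/logan-ul/Python-Duck-System-NFC-Card-Writer-Demo | nfc_writer_portal.py | _best_uri_prefix
-- ===== SOURCE A (Python) =====
-- from typing import Callable, Optional, Tuple, Dict, Any, List
--
-- URI_PREFIX_TABLE = [
--     "", "http://www.", "https://www.", "http://", "https://",
--     "tel:", "mailto:", "ftp://anonymous:anonymous@", "ftp://ftp.",
--     "ftps://", "sftp://", "smb://", "nfs://", "ftp://", "dav://",
--     "news:", "telnet://", "imap:", "rtsp://", "urn:", "pop:",
--     "sip:", "sips:", "tftp:", "btspp://", "btl2cap://",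
--     "btgoep://", "tcpobex://", "irdaobex://", "file://",
--     "urn:epc:id:", "urn:epc:tag:", "urn:epc:pat:", "urn:epc:raw:",
--     "urn:epc:", "urn:nfc:"
-- ]
--
-- def _best_uri_prefix(url: str) -> Tuple[int, str]:
--     if url is None:
--         return 0, ""
--     best_code = 0
--     best_len = 0
--     for code, prefix in enumerate(URI_PREFIX_TABLE):
--         if prefix and url.startswith(prefix) and len(prefix) > best_len:
--             best_code = code
--             best_len = len(prefix)
--     remainder = url[best_len:] if best_len > 0 else url
--     return best_code, remainder
-- ===== SOURCE B (Python) =====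
-- from typing import Tuple
--
-- URI_PREFIX_TABLE = [
--     "", "http://www.", "https://www.", "http://", "https://",
--     "tel:", "mailto:", "ftp://anonymous:anonymous@", "ftp://ftp.",
--     "ftps://", "sftp://", "smb://", "nfs://", "ftp://", "dav://",
--     "news:", "telnet://", "imap:", "rtsp://", "urn:", "pop:",
--     "sip:", "sips:", "tftp:", "btspp://", "btl2cap://",
--     "btgoep://", "tcpobex://", "irdaobex://", "file://",
--     "urn:epc:id:", "urn:epc:tag:", "urn:epc:pat:", "urn:epc:raw:",
--     "urn:epc:", "urn:nfc:"
-- ]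
--
-- # Non-empty prefixes ordered by descending length (stable, so ties keep code order):
-- # the first match in this order is the longest match.
-- _SORTED_PREFIXES = sorted(
--     ((code, prefix) for code, prefix in enumerate(URI_PREFIX_TABLE) if prefix),
--     key=lambda cp: -len(cp[1]),
-- )
--
-- def _best_uri_prefix(url: str) -> Tuple[int, str]:
--     if url is None:
--         return 0, ""
--     for code, prefix in _SORTED_PREFIXES:
--         if url.startswith(prefix):
--             return code, url[len(prefix):]
--     return 0, url
-- ===== Notes on version B (the rewrite author's own statement) =====
-- stated objective: alternative
-- what changed: Instead of scanning the whole table while tracking the max-length match, B precomputes the non-empty (code, prefix) pairs sorted by descending prefix length once at module load and returns on the first prefix that matches, so the scan exits early at the longest match.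
import Mathlib
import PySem

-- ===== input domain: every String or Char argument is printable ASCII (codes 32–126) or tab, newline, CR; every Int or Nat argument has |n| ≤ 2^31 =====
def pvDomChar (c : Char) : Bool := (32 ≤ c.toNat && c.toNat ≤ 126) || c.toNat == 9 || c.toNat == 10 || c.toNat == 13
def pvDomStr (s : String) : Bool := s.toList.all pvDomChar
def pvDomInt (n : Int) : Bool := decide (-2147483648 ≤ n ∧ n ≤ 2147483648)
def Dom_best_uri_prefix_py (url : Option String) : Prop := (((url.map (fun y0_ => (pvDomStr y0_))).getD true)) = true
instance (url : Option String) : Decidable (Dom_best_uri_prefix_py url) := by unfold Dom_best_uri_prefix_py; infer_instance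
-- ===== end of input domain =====

-- B replaces A's scan-all-while-tracking-the-max with a list of the non-empty (code, prefix)
-- pairs sorted once by descending prefix length, scanned with an early exit at the first match.

-- ===== PORT A =====
def URI_PREFIX_TABLE : List String := [
  "", "http://www.", "https://www.", "http://", "https://",
  "tel:", "mailto:", "ftp://anonymous:anonymous@", "ftp://ftp.",
  "ftps://", "sftp://", "smb://", "nfs://", "ftp://", "dav://",
  "news:", "telnet://", "imap:", "rtsp://", "urn:", "pop:",
  "sip:", "sips:", "tftp:", "btspp://", "btl2cap://",
  "btgoep://", "tcpobex://", "irdaobex://", "file://",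
  "urn:epc:id:", "urn:epc:tag:", "urn:epc:pat:", "urn:epc:raw:",
  "urn:epc:", "urn:nfc:"]

def best_uri_prefix_py (url : Option String) : Int × String :=
  match url with
  | none => (0, "")
  | some u =>
    let st := (PySem.List.enumerate URI_PREFIX_TABLE).foldl
      (fun (b : Int × Int) cp =>
        if decide (cp.2 ≠ "") && PySem.Str.startswith u cp.2 && decide (PySem.Str.len cp.2 > b.2)
        then (cp.1, PySem.Str.len cp.2) else b) (0, 0)
    (st.1, if st.2 > 0 then PySem.Str.slice u (some st.2) none else u)

-- ===== PORT B =====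
-- module-level constant _SORTED_PREFIXES of Source B
def SORTED_PREFIXES : List (Int × String) :=
  PySem.List.sorted
    ((PySem.List.enumerate URI_PREFIX_TABLE).filter (fun cp => decide (cp.2 ≠ "")))
    (fun cp => -(PySem.Str.len cp.2))

-- the for-loop of Source B with its early return
def findPrefix (u : String) : List (Int × String) → Int × String
  | [] => (0, u)
  | (c, p) :: rest =>
    if PySem.Str.startswith u p then (c, PySem.Str.slice u (some (PySem.Str.len p)) none)
    else findPrefix u rest

def best_uri_prefix_py_alt (url : Option String) : Int × String :=
  match url with
  | none => (0, "")
  | some u => findPrefix u SORTED_PREFIXES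

-- ===== PRECONDITION & SPEC =====
def Spec_best_uri_prefix_py (url : Option String) (out : Int × String) : Prop := out = best_uri_prefix_py_alt url
instance (url : Option String) (out : Int × String) : Decidable (Spec_best_uri_prefix_py url out) := by unfold Spec_best_uri_prefix_py; infer_instance

-- ===== CLAIM (what is proved, stated in full; the proofs are below) =====
def Claim_equal_best_uri_prefix_py : Prop := ∀ (url : Option String), Dom_best_uri_prefix_py url → Spec_best_uri_prefix_py url (best_uri_prefix_py url)

-- ===== LEMMAS AND PROOFS =====

-- A's fold step, abstracted over the match test m (instantiated with `PySem.Str.startswith u`).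
def pvStep (m : String → Bool) (b : Int × Int) (cp : Int × String) : Int × Int :=
  if m cp.2 && decide (PySem.Str.len cp.2 > b.2) then (cp.1, PySem.Str.len cp.2) else b

-- a non-matching entry is a no-op of the fold, so it can be erased
lemma foldl_pvStep_erase (m : String → Bool) (x : Int × String) (hx : m x.2 = false) :
    ∀ (l : List (Int × String)) (b : Int × Int),
      l.foldl (pvStep m) b = (l.erase x).foldl (pvStep m) b := by
  intro l
  induction l with
  | nil => intro b; rfl
  | cons y t ih =>
    intro b
    by_cases hyx : y = x
    · subst hyx
      rw [List.erase_cons_head]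
      simp [List.foldl_cons, pvStep, hx]
    · rw [List.erase_cons_tail (by simp [hyx])]
      simp only [List.foldl_cons]
      exact ih _

-- while every matching entry is shorter than K, the tracked best length stays below K
lemma foldl_pvStep_lt (m : String → Bool) (K : Int) :
    ∀ (l : List (Int × String)) (b : Int × Int),
      (∀ x ∈ l, m x.2 = true → PySem.Str.len x.2 < K) → b.2 < K →
      (l.foldl (pvStep m) b).2 < K := by
  intro l
  induction l with
  | nil => intro b _ hb; exact hb
  | cons y t ih =>
    intro b hl hb
    simp only [List.foldl_cons]
    apply ih
    · intro x hx hm; exact hl x (List.mem_cons_of_mem _ hx) hm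
    · unfold pvStep
      split
      · next h =>
        simp only [Bool.and_eq_true, decide_eq_true_eq] at h
        exact hl y List.mem_cons_self h.1
      · exact hb

-- once the best length is at least every remaining entry's length, the fold is stuck
lemma foldl_pvStep_stuck (m : String → Bool) :
    ∀ (l : List (Int × String)) (b : Int × Int),
      (∀ x ∈ l, PySem.Str.len x.2 ≤ b.2) →
      l.foldl (pvStep m) b = b := by
  intro l
  induction l with
  | nil => intro b _; rfl
  | cons y t ih =>
    intro b hl
    simp only [List.foldl_cons]
    have hy : PySem.Str.len y.2 ≤ b.2 := hl y List.mem_cons_self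
    have hstep : pvStep m b y = b := by
      unfold pvStep
      split
      · next h =>
        simp only [Bool.and_eq_true, decide_eq_true_eq] at h
        omega
      · rfl
    rw [hstep]
    exact ih b (fun x hx => hl x (List.mem_cons_of_mem _ hx))

-- CORE: A's max-tracking fold over LA equals the first match of LB, any rearrangement of LA
-- ordered by strictly decreasing length with ties broken by ascending code (= stable desc sort,
-- since LA's codes are strictly increasing).
lemma fold_eq_find (m : String → Bool) :
    ∀ (LB LA : List (Int × String)),
      LB.Perm LA →
      LB.Pairwise (fun x y => PySem.Str.len y.2 < PySem.Str.len x.2 ∨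
        (PySem.Str.len x.2 = PySem.Str.len y.2 ∧ x.1 < y.1)) →
      LA.Pairwise (fun x y => x.1 < y.1) →
      (∀ x ∈ LB, 0 < PySem.Str.len x.2) →
      LA.foldl (pvStep m) (0, 0) =
        (match LB.find? (fun cp => m cp.2) with
         | some (c, p) => (c, PySem.Str.len p)
         | none => ((0 : Int), (0 : Int))) := by
  intro LB
  induction LB with
  | nil =>
    intro LA hperm _ _ _
    rw [List.nil_perm.mp hperm]
    rfl
  | cons hd tl ih =>
    intro LA hperm hpw hc hpos
    obtain ⟨c, p⟩ := hd
    by_cases hm : m p = true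
    · -- head matches: the fold must end in (c, len p)
      simp only [List.find?_cons, hm]
      have hmem : (c, p) ∈ LA := hperm.subset List.mem_cons_self
      obtain ⟨l1, l2, rfl⟩ := List.append_of_mem hmem
      -- every element of LA is the head or dominated by it
      have hdom : ∀ x ∈ l1 ++ (c, p) :: l2, x = (c, p) ∨
          PySem.Str.len x.2 < PySem.Str.len p ∨
          (PySem.Str.len p = PySem.Str.len x.2 ∧ c < x.1) := by
        intro x hx
        have hx' : x ∈ (c, p) :: tl := hperm.symm.subset hx
        rcases List.mem_cons.mp hx' with h | h
        · exact Or.inl h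
        · exact Or.inr (by simpa using (List.pairwise_cons.mp hpw).1 x h)
      -- codes along LA are strictly increasing
      have hc' := List.pairwise_append.mp hc
      have hcmid := List.pairwise_cons.mp hc'.2.1
      -- elements of l1 have code < c, hence (if matching) strictly shorter than p
      have hl1 : ∀ x ∈ l1, m x.2 = true → PySem.Str.len x.2 < PySem.Str.len p := by
        intro x hx _
        have hcode : x.1 < c := hc'.2.2 x hx (c, p) List.mem_cons_self
        rcases hdom x (List.mem_append_left _ hx) with h | h | ⟨_, h⟩
        · rw [h] at hcode; simp at hcode
        · exact h
        · omega
      -- elements of l2 have length at most len p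
      have hl2 : ∀ x ∈ l2, PySem.Str.len x.2 ≤ PySem.Str.len p := by
        intro x hx
        have hcode : c < x.1 := hcmid.1 x hx
        rcases hdom x (List.mem_append_right _ (List.mem_cons_of_mem _ hx)) with h | h | ⟨h, _⟩
        · rw [h] at hcode; simp at hcode
        · omega
        · omega
      have hppos : (0 : Int) < PySem.Str.len p := hpos (c, p) List.mem_cons_self
      rw [List.foldl_append]
      have hst1 : (l1.foldl (pvStep m) (0, 0)).2 < PySem.Str.len p :=
        foldl_pvStep_lt m _ l1 (0, 0) hl1 hppos
      simp only [List.foldl_cons]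
      have hstep : pvStep m (l1.foldl (pvStep m) (0, 0)) (c, p) = (c, PySem.Str.len p) := by
        unfold pvStep
        simp only [hm, Bool.true_and]
        rw [decide_eq_true (by exact hst1)]
        simp
      rw [hstep]
      exact foldl_pvStep_stuck m l2 _ hl2
    · -- head does not match: erase it from LA and recurse
      simp only [Bool.not_eq_true] at hm
      simp only [List.find?_cons, hm]
      have hperm' : tl.Perm (LA.erase (c, p)) :=
        (List.cons_perm_iff_perm_erase.mp hperm).2
      rw [foldl_pvStep_erase m (c, p) hm LA (0, 0)]
      exact ih _ hperm' (List.pairwise_cons.mp hpw).2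
        (hc.sublist List.erase_sublist)
        (fun x hx => hpos x (List.mem_cons_of_mem _ hx))

-- B's loop expressed through find?
lemma findPrefix_eq_find? (u : String) :
    ∀ (l : List (Int × String)),
      findPrefix u l =
        (match l.find? (fun cp => PySem.Str.startswith u cp.2) with
         | some (c, p) => (c, PySem.Str.slice u (some (PySem.Str.len p)) none)
         | none => ((0 : Int), u)) := by
  intro l
  induction l with
  | nil => rfl
  | cons hd tl ih =>
    obtain ⟨c, p⟩ := hd
    cases hm : PySem.Str.startswith u p with
    | true =>
      rw [PySem.Str.startswith_eq] at hm
      simp [findPrefix, hm]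
    | false =>
      rw [PySem.Str.startswith_eq] at hm
      simp [findPrefix, hm, ih]

-- the filtered enumerated table (A's effective scan list)
def pvFiltered : List (Int × String) :=
  (PySem.List.enumerate URI_PREFIX_TABLE).filter (fun cp => decide (cp.2 ≠ ""))

lemma sorted_pairwise_lex :
    SORTED_PREFIXES.Pairwise (fun x y => PySem.Str.len y.2 < PySem.Str.len x.2 ∨
      (PySem.Str.len x.2 = PySem.Str.len y.2 ∧ x.1 < y.1)) := by decide

lemma filtered_codes_increasing : pvFiltered.Pairwise (fun x y => x.1 < y.1) := by decide

lemma sorted_pos : ∀ x ∈ SORTED_PREFIXES, 0 < PySem.Str.len x.2 := by decide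

-- ===== VERDICT (by name: the statement is the Claim_ definition above) =====
theorem best_uri_prefix_py_spec : Claim_equal_best_uri_prefix_py := by
  intro url _
  unfold Spec_best_uri_prefix_py
  match url with
  | none => rfl
  | some u =>
    have hperm : SORTED_PREFIXES.Perm pvFiltered := PySem.List.sorted_perm _ _ _
    -- A's fold over the enumerated table is definitionally the pvStep fold of the filtered list
    -- (the table is a literal, so the p ≠ "" test in A's condition evaluates entry by entry)
    show ((pvFiltered.foldl (pvStep (PySem.Str.startswith u)) (0, 0)).1,
        if (pvFiltered.foldl (pvStep (PySem.Str.startswith u)) (0, 0)).2 > 0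
        then PySem.Str.slice u (some ((pvFiltered.foldl (pvStep (PySem.Str.startswith u)) (0, 0)).2)) none
        else u) = findPrefix u SORTED_PREFIXES
    rw [fold_eq_find (PySem.Str.startswith u) SORTED_PREFIXES pvFiltered hperm
          sorted_pairwise_lex filtered_codes_increasing sorted_pos,
        findPrefix_eq_find? u SORTED_PREFIXES]
    cases hfind : SORTED_PREFIXES.find? (fun cp => PySem.Str.startswith u cp.2) with
    | none => simp
    | some cp =>
      obtain ⟨c, p⟩ := cp
      have hpp : 0 < PySem.Str.len p :=
        sorted_pos (c, p) (List.mem_of_find?_eq_some hfind)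
      simp only []
      rw [if_pos hpp]
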